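-- pv_equiv track=rewrite | github.com/ef10007/Data_structures | Practice/fizz_buzz.py | my_version
-- ===== SOURCE A (Python) =====
-- def my_version(n):
--     lst = []
--     for i in range(1, n + 1):
--         if i % 3 == 0 and i % 5 == 0:
--             i = 'FizzBuzz'
--             lst.append(i)
--         elif i % 3 == 0:
--             i = 'Fizz'
--             lst.append(i)
--         elif i % 5 == 0:
--             i = 'Buzz'
--             lst.append(i)
--         else:
--             lst.append(i)
--     return [str(i) for i in lst]
-- ===== SOURCE B (Python) =====
-- def my_version(n):
--     if n <= 0:
--         return []
--     out = [str(i) for i in range(1, n + 1)]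
--     for k in range(2, n, 3):
--         out[k] = 'Fizz'
--     for k in range(4, n, 5):
--         out[k] = 'Buzz'
--     for k in range(14, n, 15):
--         out[k] = 'FizzBuzz'
--     return out
-- ===== Notes on version B (the rewrite author's own statement) =====
-- stated objective: alternative
-- what changed: Replaces A's per-element four-way classification (building a mixed int/str list then a final str() pass) with a sieve: stringify 1..n once, then three index-stepping overwrite passes (step 3 writes 'Fizz', step 5 'Buzz', step 15 'FizzBuzz') with no divisibility tests at all.
import Mathlib
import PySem

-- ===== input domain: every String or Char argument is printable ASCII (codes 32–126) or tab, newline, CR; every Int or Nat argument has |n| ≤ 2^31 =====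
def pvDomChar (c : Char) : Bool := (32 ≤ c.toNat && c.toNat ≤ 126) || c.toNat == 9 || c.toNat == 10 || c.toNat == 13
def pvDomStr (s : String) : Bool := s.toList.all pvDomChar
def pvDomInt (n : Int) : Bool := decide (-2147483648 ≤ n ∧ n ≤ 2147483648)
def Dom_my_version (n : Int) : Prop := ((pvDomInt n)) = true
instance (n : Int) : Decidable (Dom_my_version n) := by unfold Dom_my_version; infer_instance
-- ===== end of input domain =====

-- B replaces A's per-element four-way classification (plus a final str() pass over a mixed
-- list) by a sieve: stringify 1..n once, then three overwrite passes stepping by 3, 5, 15.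

-- ===== PORT A =====
-- A builds a heterogeneous list (ints and strings), then stringifies; ported via Int ⊕ String.
-- pvStep is A's loop body; pvStr is str() on the mixed element.
def pvStep : List (Int ⊕ String) → Int → List (Int ⊕ String) := fun acc i =>
    if PySem.Int.mod i 3 = 0 ∧ PySem.Int.mod i 5 = 0 then acc ++ [Sum.inr "FizzBuzz"]
    else if PySem.Int.mod i 3 = 0 then acc ++ [Sum.inr "Fizz"]
    else if PySem.Int.mod i 5 = 0 then acc ++ [Sum.inr "Buzz"]
    else acc ++ [Sum.inl i]

def pvStr : Int ⊕ String → String := fun x => match x with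
    | Sum.inl i => PySem.Int.toStr i
    | Sum.inr s => s

def my_version (n : Int) : List String :=
  let lst := (PySem.List.pyRange 1 (n + 1) 1).foldl pvStep ([] : List (Int ⊕ String))
  lst.map pvStr

-- ===== PORT B =====
-- out[k] = v : the loop indices are always 0 ≤ k < len(out), so List.set on k.toNat is exact.
def pvSet (v : String) : List String → Int → List String := fun l k => l.set k.toNat v

def my_version_alt (n : Int) : List String :=
  if n ≤ 0 then []
  else
    let out0 := (PySem.List.pyRange 1 (n + 1) 1).map PySem.Int.toStr
    let out1 := (PySem.List.pyRange 2 n 3).foldl (pvSet "Fizz") out0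
    let out2 := (PySem.List.pyRange 4 n 5).foldl (pvSet "Buzz") out1
    let out3 := (PySem.List.pyRange 14 n 15).foldl (pvSet "FizzBuzz") out2
    out3

-- ===== PRECONDITION & SPEC =====
def Spec_my_version (n : Int) (out : List String) : Prop := out = my_version_alt n
instance (n : Int) (out : List String) : Decidable (Spec_my_version n out) := by unfold Spec_my_version; infer_instance

-- ===== CLAIM =====
def Claim_equal_my_version : Prop := ∀ (n : Int), Dom_my_version n → Spec_my_version n (my_version n)

-- ===== LEMMAS AND PROOFS =====
-- The per-element classification both programs compute.
def pvFb (i : Int) : String :=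
  if (3:Int) ∣ i ∧ (5:Int) ∣ i then "FizzBuzz"
  else if (3:Int) ∣ i then "Fizz"
  else if (5:Int) ∣ i then "Buzz"
  else PySem.Int.toStr i

lemma pvFold_map (l : List Int) (acc : List (Int ⊕ String)) :
    (l.foldl pvStep acc).map pvStr = acc.map pvStr ++ l.map pvFb := by
  induction l generalizing acc with
  | nil => simp
  | cons i t ih =>
    have hstep : (pvStep acc i).map pvStr = acc.map pvStr ++ [pvFb i] := by
      unfold pvStep pvFb pvStr
      simp only [PySem.Int.mod_eq_zero_iff_dvd]
      by_cases h3 : (3:Int) ∣ i <;> by_cases h5 : (5:Int) ∣ i <;> simp [h3, h5]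
    simp [List.foldl_cons, ih, hstep]

lemma pvSet_foldl_length (v : String) (ks : List Int) (l : List String) :
    (ks.foldl (pvSet v) l).length = l.length := by
  induction ks generalizing l with
  | nil => rfl
  | cons k t ih => simp [List.foldl_cons, ih, pvSet]

lemma pvSet_foldl_get? (v : String) (ks : List Int) (l : List String) (i : Nat) :
    (ks.foldl (pvSet v) l)[i]? =
      if i ∈ ks.map Int.toNat ∧ i < l.length then some v else l[i]? := by
  induction ks generalizing l with
  | nil => simp
  | cons k t ih =>
    simp only [List.foldl_cons]
    rw [ih]
    have hlen : (pvSet v l k).length = l.length := by simp [pvSet]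
    rw [hlen]
    by_cases h2 : i < l.length
    · by_cases h3 : k.toNat = i
      · simp [pvSet, h3, h2]
      · by_cases h1 : i ∈ t.map Int.toNat
        · simp [h1, h2]
        · simp [pvSet, h1, h2, Ne.symm (h3 : k.toNat ≠ i)]
          exact List.getElem_set_ne h3 (by simpa using h2)
    · have hge : l.length ≤ i := le_of_not_gt h2
      simp [pvSet, h2]

lemma pvMem_map_toNat_pyRange (a s n : Int) (ha : 0 ≤ a) (hs : 0 < s) (i : Nat) :
    (i ∈ (PySem.List.pyRange a n s).map Int.toNat) ↔
      (a ≤ (i:Int) ∧ (i:Int) < n ∧ s ∣ (i:Int) - a) := by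
  simp only [List.mem_map, PySem.List.mem_pyRange_iff_of_pos hs]
  constructor
  · rintro ⟨k, ⟨hk1, hk2, hk3⟩, hkt⟩
    have hk0 : 0 ≤ k := le_trans ha hk1
    have : (i : Int) = k := by rw [← hkt, Int.toNat_of_nonneg hk0]
    rw [this]; exact ⟨hk1, hk2, hk3⟩
  · rintro ⟨h1, h2, h3⟩
    exact ⟨(i : Int), ⟨h1, h2, h3⟩, Int.toNat_natCast i⟩

-- B's sieve equals the classification map, element by element.
lemma pvAlt_eq_map (n : Int) :
    my_version_alt n = (PySem.List.pyRange 1 (n + 1) 1).map pvFb := by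
  by_cases hn : n ≤ 0
  · simp [my_version_alt, hn, PySem.List.pyRange_one_eq_nil (by omega : n + 1 ≤ 1)]
  · unfold my_version_alt
    rw [if_neg hn]
    have hlen0 : ((PySem.List.pyRange 1 (n + 1) 1).map PySem.Int.toStr).length = (n).toNat := by
      simp [PySem.List.length_pyRange_one]
    apply List.ext_getElem?
    intro i
    rw [pvSet_foldl_get?, pvSet_foldl_length, pvSet_foldl_get?, pvSet_foldl_length,
        pvSet_foldl_get?, hlen0]
    by_cases hi : i < n.toNat
    · have hin : (i : Int) < n := by omega
      have hbase : ((PySem.List.pyRange 1 (n + 1) 1).map PySem.Int.toStr)[i]? =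
          some (PySem.Int.toStr (1 + (i:Int))) := by
        simp [List.getElem?_map, PySem.List.getElem?_pyRange_one]
        omega
      have htgt : ((PySem.List.pyRange 1 (n + 1) 1).map pvFb)[i]? =
          some (pvFb (1 + (i:Int))) := by
        simp [List.getElem?_map, PySem.List.getElem?_pyRange_one]
        omega
      rw [hbase, htgt]
      simp only [pvMem_map_toNat_pyRange 2 3 n (by omega) (by omega),
          pvMem_map_toNat_pyRange 4 5 n (by omega) (by omega),
          pvMem_map_toNat_pyRange 14 15 n (by omega) (by omega)]
      by_cases h3 : (3:Int) ∣ (1 + (i:Int)) <;> by_cases h5 : (5:Int) ∣ (1 + (i:Int))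
      · have h15 : (15:Int) ∣ (i:Int) - 14 := by omega
        simp [pvFb, h3, h5, hi, hin, h15, show (14:Int) ≤ i by omega]
      · have h15 : ¬ (15:Int) ∣ (i:Int) - 14 := by omega
        have h5' : ¬ (5:Int) ∣ (i:Int) - 4 := by omega
        have h3' : (3:Int) ∣ (i:Int) - 2 := by omega
        simp [pvFb, h3, h5, hi, hin, h15, h5', h3', show (2:Int) ≤ i by omega]
      · have h15 : ¬ (15:Int) ∣ (i:Int) - 14 := by omega
        have h5' : (5:Int) ∣ (i:Int) - 4 := by omega
        simp [pvFb, h3, h5, hi, hin, h15, h5', show (4:Int) ≤ i by omega]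
      · have h15 : ¬ (15:Int) ∣ (i:Int) - 14 := by omega
        have h5' : ¬ (5:Int) ∣ (i:Int) - 4 := by omega
        have h3' : ¬ (3:Int) ∣ (i:Int) - 2 := by omega
        simp [pvFb, h3, h5, hi, h15, h5', h3']
    · have h1 : ¬ ((i:Int) < n) := by omega
      simp [pvMem_map_toNat_pyRange 2 3 n (by omega) (by omega),
            pvMem_map_toNat_pyRange 4 5 n (by omega) (by omega),
            pvMem_map_toNat_pyRange 14 15 n (by omega) (by omega), h1, hi]

-- ===== VERDICT =====
theorem my_version_spec : Claim_equal_my_version := by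
  intro n _
  show my_version n = my_version_alt n
  unfold my_version
  rw [pvAlt_eq_map]
  exact pvFold_map (PySem.List.pyRange 1 (n + 1) 1) []
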